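-- pv_equiv track=rewrite | github.com/name165/300prob | cos pro/2차시/문제5.py | solution
-- ===== SOURCE A (Python) =====
-- def solution(attack, recovery, hp):
--     count = 0
--     while True:
--         count += 1
--         hp -= attack
--         if hp <= 0:
--             return count
--         hp += recovery
-- ===== SOURCE B (Python) =====
-- def solution(attack, recovery, hp):
--     if hp <= attack:
--         return 1
--     # net damage per full round after the first hit
--     return 1 + -(-(hp - attack) // (attack - recovery))
-- ===== Notes on version B (the rewrite author's own statement) =====
-- stated objective: alternative
-- what changed: Replaces the round-by-round simulation loop with a closed-form ceiling division: 1 round if hp <= attack, else 1 + ceil((hp-attack)/(attack-recovery)).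
import Mathlib
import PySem

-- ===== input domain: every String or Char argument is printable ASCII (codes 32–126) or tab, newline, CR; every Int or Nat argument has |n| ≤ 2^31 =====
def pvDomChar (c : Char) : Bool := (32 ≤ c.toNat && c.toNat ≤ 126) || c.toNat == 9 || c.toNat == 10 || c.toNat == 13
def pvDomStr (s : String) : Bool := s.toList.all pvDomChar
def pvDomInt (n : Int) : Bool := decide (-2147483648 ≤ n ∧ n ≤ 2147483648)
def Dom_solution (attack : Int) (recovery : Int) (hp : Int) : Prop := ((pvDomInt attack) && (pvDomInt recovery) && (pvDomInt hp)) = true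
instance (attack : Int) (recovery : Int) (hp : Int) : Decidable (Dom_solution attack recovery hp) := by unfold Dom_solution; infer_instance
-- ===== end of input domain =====

-- B replaces A's round-by-round simulation loop by a closed-form ceiling division.
-- Pre_ excludes exactly the inputs on which A loops forever (hp > attack and attack <= recovery); A returns on all others.

-- ===== PORT A =====
-- fuel-bounded transcription of A's 'while True' loop; under Pre_solution the fuel
-- (hp - attack).toNat + 1 is proved sufficient, so the loop is the same computation as Python's
def solutionGo (attack : Int) (recovery : Int) : Int → Int → Nat → Int
  | _, count, 0 => count
  | hp, count, Nat.succ f =>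
      let count := count + 1
      let hp := hp - attack
      if hp ≤ 0 then count
      else solutionGo attack recovery (hp + recovery) count f

def solution (attack : Int) (recovery : Int) (hp : Int) : Int :=
  solutionGo attack recovery hp 0 ((hp - attack).toNat + 1)

-- ===== PORT B =====
def solution_alt (attack : Int) (recovery : Int) (hp : Int) : Int :=
  if hp ≤ attack then 1
  else 1 + -(PySem.Int.floordiv (-(hp - attack)) (attack - recovery))

-- ===== PRECONDITION & SPEC =====
-- exactly the inputs on which A terminates: first hit kills, or each round does net positive damage
def Pre_solution (attack : Int) (recovery : Int) (hp : Int) : Prop :=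
  hp ≤ attack ∨ recovery < attack
instance (attack : Int) (recovery : Int) (hp : Int) : Decidable (Pre_solution attack recovery hp) := by
  unfold Pre_solution; infer_instance
def pvWitness_solution : Int × Int × Int := (5, 2, 20)

def Spec_solution (attack : Int) (recovery : Int) (hp : Int) (out : Int) : Prop := out = solution_alt attack recovery hp
instance (attack : Int) (recovery : Int) (hp : Int) (out : Int) : Decidable (Spec_solution attack recovery hp out) := by unfold Spec_solution; infer_instance

-- ===== CLAIM (what is proved, stated in full; the proofs are below) =====
def Claim_equal_solution : Prop := ∀ (attack : Int) (recovery : Int) (hp : Int), Dom_solution attack recovery hp → Pre_solution attack recovery hp → Spec_solution attack recovery hp (solution attack recovery hp)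

-- ===== LEMMAS AND PROOFS =====

-- loop invariant: with enough fuel and positive net damage, the loop computes the closed form
theorem solutionGo_eq (attack recovery : Int) (hrec : recovery < attack) :
    ∀ (f : Nat) (hp count : Int), 0 < f → hp - attack + 1 ≤ (f : Int) →
      solutionGo attack recovery hp count f =
        count + (if hp ≤ attack then 1
                 else 1 + -(PySem.Int.floordiv (-(hp - attack)) (attack - recovery))) := by
  intro f
  induction f with
  | zero => intro hp count hf _; omega
  | succ f ih =>
      intro hp count _ h
      simp only [solutionGo]
      by_cases h1 : hp - attack ≤ 0
      · rw [if_pos h1, if_pos (by omega)]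
      · rw [if_neg h1]
        rw [ih (hp - attack + recovery) (count + 1) (by push_cast at h; omega) (by push_cast at h; omega)]
        rw [if_neg (show ¬ hp ≤ attack by omega)]
        set d := attack - recovery with hd
        have hdpos : 0 < d := by omega
        by_cases h2 : hp - attack ≤ d
        · -- next round kills: ceil((hp-attack)/d) = 1
          rw [if_pos (show hp - attack + recovery ≤ attack by omega)]
          have : -(PySem.Int.floordiv (-(hp - attack)) d) = 1 := by
            rw [PySem.Int.neg_floordiv_neg_eq_iff_of_pos hdpos]
            refine ⟨by simp; omega, by omega⟩
          rw [this]; ring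
        · -- recurse: ceil(m/d) = 1 + ceil((m-d)/d)
          rw [if_neg (show ¬ hp - attack + recovery ≤ attack by omega)]
          have harg : hp - attack + recovery - attack = hp - attack - d := by omega
          rw [harg]
          set q := -(PySem.Int.floordiv (-(hp - attack - d)) d) with hq
          have hqb : (q - 1) * d < hp - attack - d ∧ hp - attack - d ≤ q * d := by
            rw [← PySem.Int.neg_floordiv_neg_eq_iff_of_pos hdpos]
          have : -(PySem.Int.floordiv (-(hp - attack)) d) = q + 1 := by
            rw [PySem.Int.neg_floordiv_neg_eq_iff_of_pos hdpos]
            constructor <;> nlinarith [hqb.1, hqb.2]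
          rw [this]; ring

-- ===== VERDICT (by name: the statement is the Claim_ definition above) =====
theorem solution_spec : Claim_equal_solution := by
  intro attack recovery hp _ hpre
  unfold Spec_solution solution solution_alt
  by_cases h1 : hp ≤ attack
  · simp only [solutionGo]
    rw [if_pos (by omega : hp - attack ≤ 0), if_pos h1]; ring
  · have hrec : recovery < attack := by cases hpre with
      | inl h => omega
      | inr h => exact h
    rw [solutionGo_eq attack recovery hrec _ hp 0 (by omega) (by push_cast; omega)]
    rw [if_neg h1]; ring
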